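-- pv_equiv track=rewrite | github.com/loremacchia/litto-ui | restTesting.py | getSpreakerUrl
-- ===== SOURCE A (Python) =====
-- def getSpreakerUrl(url):
--     found = False
--     link = ""
--     str = ""
--     strs = url.split()
--     for st in strs:
--         if("src" in st):
--             str = st
--     for s in str:
--         if(s == '"'):
--             found = not found
--         if(found):
--             link += s
--     return link[1:]
-- ===== SOURCE B (Python) =====
-- def getSpreakerUrl(url):
--     token = ""
--     for st in url.split():
--         if "src" in st:
--             token = st
--     parts = token.split('"')
--     return '"'.join(parts[1::2])
-- ===== Notes on version B (the rewrite author's own statement) =====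
-- stated objective: simpler
-- what changed: replaces the char-by-char quote-toggle scan (with its link[1:] trim) by split('"') plus joining the odd-indexed segments parts[1::2]
import Mathlib
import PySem

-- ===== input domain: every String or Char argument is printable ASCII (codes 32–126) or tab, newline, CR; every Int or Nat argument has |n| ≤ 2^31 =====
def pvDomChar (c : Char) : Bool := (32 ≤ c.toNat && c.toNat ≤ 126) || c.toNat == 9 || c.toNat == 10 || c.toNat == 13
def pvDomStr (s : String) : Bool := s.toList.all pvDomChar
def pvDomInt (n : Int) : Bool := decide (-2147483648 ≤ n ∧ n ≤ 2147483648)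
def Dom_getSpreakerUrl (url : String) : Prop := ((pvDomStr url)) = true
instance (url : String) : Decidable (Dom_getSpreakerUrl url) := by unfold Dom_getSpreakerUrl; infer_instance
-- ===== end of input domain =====

-- B replaces A's char-by-char quote-toggle scan (plus the link[1:] trim) by split('"') + joining the odd-indexed segments (simpler decomposition, same cost).

-- ===== PORT A =====
-- A's inner-loop body: if s == '"': found = not found; if found: link += s
def pvStepA (p : Bool × List Char) (s : Char) : Bool × List Char :=
  let found := if s = '"' then !p.1 else p.1
  (found, if found then p.2 ++ [s] else p.2)

def getSpreakerUrl (url : String) : String :=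
  -- found = False; link = ""; str = ""; strs = url.split()
  -- for st in strs: if "src" in st: str = st
  let strs := PySem.Str.split₀ url
  let str := strs.foldl (fun acc st => if PySem.Str.isIn "src" st then st else acc) ""
  -- for s in str: (pvStepA)
  let res := str.toList.foldl pvStepA (false, ([] : List Char))
  -- return link[1:]
  String.ofList (PySem.List.slice res.2 (some 1) none)

-- ===== PORT B =====
def getSpreakerUrl_alt (url : String) : String :=
  -- token = ""; for st in url.split(): if "src" in st: token = st
  let token := (PySem.Str.split₀ url).foldl (fun t st => if PySem.Str.isIn "src" st then st else t) ""
  -- parts = token.split('"')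
  let parts := PySem.Chars.splitOn token.toList ['"']
  -- return '"'.join(parts[1::2])
  String.ofList (PySem.Chars.join ['"'] ((PySem.List.slice? parts (some 1) none 2).getD []))

-- ===== PRECONDITION & SPEC =====
def Spec_getSpreakerUrl (url : String) (out : String) : Prop := out = getSpreakerUrl_alt url
instance (url : String) (out : String) : Decidable (Spec_getSpreakerUrl url out) := by unfold Spec_getSpreakerUrl; infer_instance

-- ===== CLAIM (what is proved, stated in full; the proofs are below) =====
def Claim_equal_getSpreakerUrl : Prop := ∀ (url : String), Dom_getSpreakerUrl url → Spec_getSpreakerUrl url (getSpreakerUrl url)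

-- ===== LEMMAS AND PROOFS =====

-- output of A's toggle scan started in mode b (true = inside quotes)
def pvScan : Bool → List Char → List Char
  | _, [] => []
  | false, c :: cs => if c = '"' then '"' :: pvScan true cs else pvScan false cs
  | true, c :: cs => if c = '"' then pvScan false cs else c :: pvScan true cs

-- reference form of token.split('"')
def pvSplitQ : List Char → List (List Char)
  | [] => [[]]
  | c :: cs => if c = '"' then [] :: pvSplitQ cs else ((pvSplitQ cs).headI.cons c) :: (pvSplitQ cs).tail

-- reference form of parts[1::2]
def pvOdds {α : Type} : List α → List α
  | [] => []
  | [_] => []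
  | _ :: p :: rest => p :: pvOdds rest

lemma pvSplitQ_ne_nil (cs : List Char) : pvSplitQ cs ≠ [] := by
  cases cs with
  | nil => simp [pvSplitQ]
  | cons c cs => by_cases h : c = '"' <;> simp [pvSplitQ, h]

lemma pvFoldl_scan (cs : List Char) (b : Bool) (acc : List Char) :
    (cs.foldl pvStepA (b, acc)).2 = acc ++ pvScan b cs := by
  induction cs generalizing b acc with
  | nil => simp [pvScan]
  | cons c cs ih =>
    rw [List.foldl_cons]
    by_cases h : c = '"' <;> cases b <;>
      simp [pvStepA, h, ih, pvScan]

lemma pvScan_eq (cs : List Char) :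
    pvScan false cs = (pvOdds (pvSplitQ cs)).flatMap (fun p => '"' :: p) ∧
    pvScan true cs = (pvSplitQ cs).headI ++ (pvOdds ((pvSplitQ cs).tail)).flatMap (fun p => '"' :: p) := by
  induction cs with
  | nil => simp [pvScan, pvSplitQ, pvOdds]
  | cons c cs ih =>
    obtain ⟨p0, r, hE⟩ := List.exists_cons_of_ne_nil (pvSplitQ_ne_nil cs)
    by_cases h : c = '"'
    · constructor
      · simp only [pvScan, h, if_true, pvSplitQ, hE, ih.2, pvOdds]
        simp
      · simp only [pvScan, h, if_true, pvSplitQ, ih.1]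
        simp [hE]
    · have hodds : pvOdds ((c :: p0) :: r) = pvOdds (p0 :: r) := by
        cases r <;> simp [pvOdds]
      constructor
      · simp only [pvScan, h, if_false, pvSplitQ, hE, ih.1]
        simp [hodds, List.headI]
      · simp only [pvScan, h, if_false, pvSplitQ, hE, ih.2]
        simp

lemma pvFlat_cons (q : List Char) (r : List (List Char)) :
    ((q :: r).flatMap (fun p => '"' :: p)) = '"' :: PySem.Chars.join ['"'] (q :: r) := by
  induction r generalizing q with
  | nil => simp [PySem.Chars.join_singleton]
  | cons s r' ih => simp [PySem.Chars.join_cons_cons, ih]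

lemma pvDrop_flatMap (L : List (List Char)) :
    (L.flatMap (fun p => '"' :: p)).drop 1 = PySem.Chars.join ['"'] L := by
  cases L with
  | nil => simp [PySem.Chars.join_nil]
  | cons q r => rw [pvFlat_cons]; simp

lemma pvGo (fuel : Nat) (l cur : List Char) (acc : List (List Char)) (h : l.length ≤ fuel) :
    PySem.Chars.splitOn.go ['"'] fuel l cur acc
      = acc.reverse ++ ((pvSplitQ l).modifyHead (cur.reverse ++ ·)) := by
  induction fuel generalizing l cur acc with
  | zero =>
    have : l = [] := by cases l <;> simp_all
    subst this
    simp [PySem.Chars.splitOn.go, pvSplitQ]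
  | succ fuel ih =>
    cases l with
    | nil => simp [PySem.Chars.splitOn.go, pvSplitQ]
    | cons c rest =>
      have hlen : rest.length ≤ fuel := by simp at h; omega
      by_cases hc : c = '"'
      · subst hc
        have hpre : (['"'] : List Char).isPrefixOf ('"' :: rest) = true := by
          simp [List.isPrefixOf]
        simp only [PySem.Chars.splitOn.go, hpre, if_true]
        rw [show List.drop (['"'] : List Char).length ('"' :: rest) = rest from rfl]
        rw [ih rest [] (cur.reverse :: acc) hlen]
        obtain ⟨p0, r, hE⟩ := List.exists_cons_of_ne_nil (pvSplitQ_ne_nil rest)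
        simp [pvSplitQ, hE]
      · have hpre : (['"'] : List Char).isPrefixOf (c :: rest) = false := by
          simp [List.isPrefixOf]; exact fun hh => hc hh.symm
        simp only [PySem.Chars.splitOn.go, hpre, Bool.false_eq_true, if_false]
        rw [ih rest (c :: cur) acc hlen]
        obtain ⟨p0, r, hE⟩ := List.exists_cons_of_ne_nil (pvSplitQ_ne_nil rest)
        simp [pvSplitQ, hc, hE]

lemma pvSplitOn_eq (cs : List Char) : PySem.Chars.splitOn cs ['"'] = pvSplitQ cs := by
  rw [PySem.Chars.splitOn, pvGo _ _ _ _ (by omega)]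
  obtain ⟨p0, r, hE⟩ := List.exists_cons_of_ne_nil (pvSplitQ_ne_nil cs)
  simp [hE]

lemma pvFM {α : Type} (l : List α) :
    List.filterMap (fun (k : Nat) => l[(1 + 2*(k:Int)).toNat]?) (List.range ((l.length : Int)/2).toNat) = pvOdds l := by
  induction l using pvOdds.induct with
  | case1 => simp [pvOdds]
  | case2 x => simp [pvOdds]
  | case3 x p rest ih =>
    have hc : (((x :: p :: rest).length : Int)/2).toNat = ((rest.length : Int)/2).toNat + 1 := by
      simp only [List.length_cons]; omega
    rw [hc, List.range_succ_eq_map, List.filterMap_cons, List.filterMap_map]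
    have hf : ((fun (k : Nat) => (x :: p :: rest)[(1 + 2*(k:Int)).toNat]?) ∘ Nat.succ) =
        (fun (k : Nat) => rest[(1 + 2*(k:Int)).toNat]?) := by
      funext k
      have h2 : (1 + 2*((Nat.succ k : Nat):Int)).toNat = (1 + 2*((k:Nat):Int)).toNat + 2 := by
        push_cast; omega
      simp only [Function.comp_apply, h2]
      simp
    rw [hf]
    have h0 : ((1 + 2*(((0:Nat)):Int)).toNat) = 1 := by norm_num
    simp only [h0]
    simp [pvOdds, ih]

lemma pvSlice_odds {α : Type} (l : List α) :
    PySem.List.slice? l (some 1) none 2 = some (pvOdds l) := by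
  cases l with
  | nil => simp [PySem.List.slice?, PySem.List.sliceIndices, pvOdds]
  | cons a l' =>
    have hfm := pvFM (a :: l')
    simp only [PySem.List.slice?, PySem.List.sliceIndices]
    norm_num
    have hcnt : (if 0 < l'.length then (((l'.length : Int) + 2 - 1) / 2).toNat else 0)
        = (((a :: l').length : Int)/2).toNat := by
      split <;> (simp only [List.length_cons]; omega)
    rw [hcnt]
    exact hfm

lemma pvMain (cs : List Char) :
    PySem.List.slice ((cs.foldl pvStepA (false, ([] : List Char))).2) (some 1) none
    = PySem.Chars.join ['"'] ((PySem.List.slice? (PySem.Chars.splitOn cs ['"']) (some 1) none 2).getD []) := by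
  rw [pvFoldl_scan, PySem.List.slice_from _ (by norm_num), pvSplitOn_eq, pvSlice_odds]
  simp only [List.nil_append, Option.getD_some, (pvScan_eq cs).1, Int.toNat_one]
  exact pvDrop_flatMap _

-- ===== VERDICT (by name: the statement is the Claim_ definition above) =====
theorem getSpreakerUrl_spec : Claim_equal_getSpreakerUrl := by
  intro url _
  unfold Spec_getSpreakerUrl getSpreakerUrl getSpreakerUrl_alt
  exact congrArg String.ofList (pvMain _)
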